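-- pv_equiv track=rewrite | github.com/zh1gr/google.foo.bar | 202_lovely_lucky_lambs/solution.py | dl
-- ===== SOURCE A (Python) =====
-- def dl(tl):
--     dbl = []
--     i = 0
--     ttl = 0
--
--     while i<= tl:
--         v = 2**i
--         dbl.append(v)
--         ttl = ttl + v
--         if ttl > tl:
--             break
--         i = i + 1
--
--     return dbl
-- ===== SOURCE B (Python) =====
-- def dl(tl):
--     if tl < 0:
--         return []
--     n = (tl + 1).bit_length()
--     return [2 ** i for i in range(n)]
-- ===== Notes on version B (the rewrite author's own statement) =====
-- stated objective: simpler
-- what changed: Replaces the accumulate-and-break while-loop with a closed-form count n = (tl+1).bit_length() followed by a single generation pass over range(n).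
import Mathlib
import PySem

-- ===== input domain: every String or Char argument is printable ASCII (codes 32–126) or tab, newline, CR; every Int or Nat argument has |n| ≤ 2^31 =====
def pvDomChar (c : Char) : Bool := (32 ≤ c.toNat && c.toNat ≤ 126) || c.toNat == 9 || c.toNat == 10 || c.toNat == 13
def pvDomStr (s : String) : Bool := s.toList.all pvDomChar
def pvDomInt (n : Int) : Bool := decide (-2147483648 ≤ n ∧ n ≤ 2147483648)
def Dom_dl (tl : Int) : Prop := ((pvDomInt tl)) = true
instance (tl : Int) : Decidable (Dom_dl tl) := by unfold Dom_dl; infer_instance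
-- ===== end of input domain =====

-- B replaces A's accumulate-and-break while-loop by a closed-form element count
-- (bit_length of tl+1) followed by a single generation pass (objective: simpler).


-- ===== PORT A =====
-- the while-loop of A, state (dbl, i, ttl); terminates because i grows toward tl
def dlLoop (tl i ttl : Int) (dbl : List Int) : List Int :=
  if _h : i ≤ tl then
    let v : Int := 2 ^ i.toNat
    let dbl' := dbl ++ [v]
    let ttl' := ttl + v
    if ttl' > tl then dbl' else dlLoop tl (i + 1) ttl' dbl'
  else dbl
termination_by (tl + 1 - i).toNat
decreasing_by omega

def dl (tl : Int) : List Int := dlLoop tl 0 0 []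

-- ===== PORT B =====
-- Python int.bit_length for a positive argument (B only calls it on tl+1 ≥ 1)
def pyBitLength (n : Int) : Nat := if n ≤ 0 then 0 else n.toNat.log2 + 1

def dl_alt (tl : Int) : List Int :=
  if tl < 0 then []
  else (List.range (pyBitLength (tl + 1))).map (fun i => (2 : Int) ^ i)

-- ===== PRECONDITION & SPEC =====
def Spec_dl (tl : Int) (out : List Int) : Prop := out = dl_alt tl
instance (tl : Int) (out : List Int) : Decidable (Spec_dl tl out) := by unfold Spec_dl; infer_instance

-- ===== CLAIM (what is proved, stated in full; the proofs are below) =====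
def Claim_equal_dl : Prop := ∀ (tl : Int), Dom_dl tl → Spec_dl tl (dl tl)

-- ===== LEMMAS AND PROOFS =====

theorem int_le_two_pow (i : Nat) : (i : Int) ≤ 2 ^ i - 1 := by
  have h : ((i : Nat) : Int) < ((2 ^ i : Nat) : Int) := by exact_mod_cast Nat.lt_two_pow_self
  push_cast at h
  omega

theorem log2_eq_of (i k : Nat) (h1 : 2 ^ i ≤ k) (h2 : k < 2 ^ (i + 1)) :
    Nat.log2 k = i := by
  rw [Nat.log2_eq_log_two]
  exact Nat.log_eq_of_pow_le_of_lt_pow h1 h2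

theorem dlLoop_eq (tl : Int) (h0 : 0 ≤ tl) : ∀ (d i : Nat),
    (tl + 1).toNat.log2 + 1 - i = d → (2 : Int) ^ i - 1 ≤ tl →
    dlLoop tl (i : Int) ((2 : Int) ^ i - 1) ((List.range i).map (fun j => (2 : Int) ^ j))
      = (List.range ((tl + 1).toNat.log2 + 1)).map (fun j => (2 : Int) ^ j) := by
  intro d
  induction d with
  | zero =>
    intro i hd hle
    exfalso
    -- i ≥ log2(tl+1)+1 contradicts 2^i - 1 ≤ tl
    have hk : (tl + 1).toNat < 2 ^ ((tl + 1).toNat.log2 + 1) := Nat.lt_log2_self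
    have hpow : (2 : Nat) ^ ((tl + 1).toNat.log2 + 1) ≤ 2 ^ i :=
      Nat.pow_le_pow_right (by norm_num) (by omega)
    have hle' : ((2 : Nat) ^ i : Int) ≤ tl + 1 := by push_cast; omega
    have : ((tl + 1).toNat : Int) = tl + 1 := by omega
    have : (2 : Nat) ^ i ≤ (tl + 1).toNat := by omega
    omega
  | succ d ih =>
    intro i hd hle
    have hiInt : ((i : Int)) ≤ tl := le_trans (int_le_two_pow i) hle
    rw [dlLoop, dif_pos hiInt]
    have htoNat : ((i : Int)).toNat = i := Int.toNat_natCast i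
    have hv : (2 : Int) ^ ((i : Int)).toNat = (2 : Int) ^ i := by rw [htoNat]
    simp only [htoNat]
    have hrange : (List.range i).map (fun j => (2 : Int) ^ j) ++ [(2 : Int) ^ i]
        = (List.range (i + 1)).map (fun j => (2 : Int) ^ j) := by
      rw [List.range_succ, List.map_append, List.map_cons, List.map_nil]
    have hsum : (2 : Int) ^ i - 1 + 2 ^ i = 2 ^ (i + 1) - 1 := by ring
    by_cases hbr : (2 : Int) ^ i - 1 + 2 ^ i > tl
    · rw [if_pos hbr, hrange]
      -- break: cumulative total exceeded tl, so i + 1 is the final count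
      have h1 : (2 : Nat) ^ i ≤ (tl + 1).toNat := by
        have : ((2 : Nat) ^ i : Int) ≤ tl + 1 := by push_cast; omega
        omega
      have h2 : (tl + 1).toNat < 2 ^ (i + 1) := by
        have : (tl : Int) + 1 < ((2 : Nat) ^ (i + 1) : Int) := by push_cast; linarith [hsum]
        omega
      rw [log2_eq_of i _ h1 h2]
    · rw [if_neg hbr]
      have hle' : (2 : Int) ^ (i + 1) - 1 ≤ tl := by linarith [hsum]
      -- i + 1 is still within the final count, so the distance decreases
      have hlog : i + 1 ≤ (tl + 1).toNat.log2 := by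
        have hne : (tl + 1).toNat ≠ 0 := by omega
        rw [Nat.le_log2 hne]
        have : ((2 : Nat) ^ (i + 1) : Int) ≤ tl + 1 := by push_cast; omega
        omega
      have := ih (i + 1) (by omega) hle'
      push_cast at this ⊢
      rw [hsum, hrange]
      exact this

theorem dl_eq_alt (tl : Int) : dl tl = dl_alt tl := by
  by_cases h : tl < 0
  · rw [dl, dlLoop, dif_neg (by omega), dl_alt, if_pos h]
  · have h0 : 0 ≤ tl := by omega
    have := dlLoop_eq tl h0 ((tl + 1).toNat.log2 + 1 - 0) 0 rfl (by norm_num; omega)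
    simp only [Nat.cast_zero, pow_zero, List.range_zero, List.map_nil] at this
    rw [dl]
    norm_num at this
    rw [this, dl_alt, if_neg h, pyBitLength, if_neg (by omega)]

-- ===== VERDICT (by name: the statement is the Claim_ definition above) =====
theorem dl_spec : Claim_equal_dl := by
  intro tl _
  unfold Spec_dl
  exact dl_eq_alt tl
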